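-- pv_equiv track=rewrite | github.com/ranoli90/Jobhuntin | packages/backend/domain/resume_tailoring.py | _prioritize_skills
-- ===== SOURCE A (Python) =====
-- def _prioritize_skills(
--
--     skills: dict[str, list[str]],
--     job_description: str,
-- ) -> list[str]:
--     """Prioritize skills based on job description relevance."""
--     job_lower = job_description.lower()
--     technical = skills.get("technical", [])
--     soft = skills.get("soft", [])
--
--     all_skills = technical + soft
--
--     def skill_relevance(skill: str) -> int:
--         skill_lower = skill.lower()
--         if skill_lower in job_lower:
--             return 2
--         for word in job_lower.split():
--             if skill_lower in word or word in skill_lower: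
--                 return 1
--         return 0
--
--     scored = [(skill, skill_relevance(skill)) for skill in all_skills]
--     scored.sort(key=lambda x: x[1], reverse=True)
--
--     return [skill for skill, score in scored if score > 0] + [
--         skill for skill, score in scored if score == 0
--     ]
-- ===== SOURCE B (Python) =====
-- def _prioritize_skills(
--     skills: dict[str, list[str]],
--     job_description: str,
-- ) -> list[str]:
--     """Prioritize skills based on job description relevance."""
--     job_lower = job_description.lower()
--     all_skills = skills.get("technical", []) + skills.get("soft", [])
--     words = job_lower.split()
--
--     high, mid, low = [], [], []
--     for skill in all_skills:
--         skill_lower = skill.lower()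
--         if skill_lower in job_lower:
--             high.append(skill)
--         elif any(skill_lower in w or w in skill_lower for w in words):
--             mid.append(skill)
--         else:
--             low.append(skill)
--     return high + mid + low
-- ===== Notes on version B (the rewrite author's own statement) =====
-- stated objective: simpler
-- what changed: Replaces score-into-tuples, stable sort by score, and two filtering comprehensions with a single pass that appends each skill to one of three buckets (exact match / word match / no match) and concatenates them.
import Mathlib
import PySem

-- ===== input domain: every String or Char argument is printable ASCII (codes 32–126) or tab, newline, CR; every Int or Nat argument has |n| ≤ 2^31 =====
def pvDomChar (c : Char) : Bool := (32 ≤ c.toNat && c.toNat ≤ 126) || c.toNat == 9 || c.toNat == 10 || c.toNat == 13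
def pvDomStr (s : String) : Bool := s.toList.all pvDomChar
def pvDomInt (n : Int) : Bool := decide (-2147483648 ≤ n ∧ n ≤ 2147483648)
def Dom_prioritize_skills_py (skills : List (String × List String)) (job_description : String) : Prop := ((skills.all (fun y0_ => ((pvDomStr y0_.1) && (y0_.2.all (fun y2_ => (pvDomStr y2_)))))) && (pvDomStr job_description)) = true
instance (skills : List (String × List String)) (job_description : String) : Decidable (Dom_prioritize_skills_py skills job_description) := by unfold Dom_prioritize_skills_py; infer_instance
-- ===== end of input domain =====

-- B replaces A's score/stable-sort/double-filter pipeline by a single three-bucket pass in encounter order (objective: simpler).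

-- ===== PORT A =====
-- the 'for word in job_lower.split(): … return 1' loop of skill_relevance
def pvRelLoop (skill_lower : String) : List String → Int
  | [] => 0
  | w :: ws =>
    if PySem.Str.isIn skill_lower w || PySem.Str.isIn w skill_lower then 1
    else pvRelLoop skill_lower ws

def pvSkillRelevance (job_lower : String) (skill : String) : Int :=
  let skill_lower := PySem.Str.lower skill
  if PySem.Str.isIn skill_lower job_lower then 2
  else pvRelLoop skill_lower (PySem.Str.split₀ job_lower)

def prioritize_skills_py (skills : List (String × List String)) (job_description : String) : List String :=
  let job_lower := PySem.Str.lower job_description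
  let technical := (PySem.Dict.mk skills).getD "technical" []
  let soft := (PySem.Dict.mk skills).getD "soft" []
  let all_skills := technical ++ soft
  let scored := all_skills.map (fun skill => (skill, pvSkillRelevance job_lower skill))
  let sorted := PySem.List.sorted scored (fun x => x.2) true
  (sorted.filter (fun x => decide (0 < x.2))).map (fun x => x.1)
    ++ (sorted.filter (fun x => x.2 == 0)).map (fun x => x.1)

-- ===== PORT B =====
-- loop body of Source B: append the skill to the high / mid / low bucket
def pvStep (job_lower : String) (words : List String)
    (acc : List String × List String × List String) (skill : String) :
    List String × List String × List String :=
  let skill_lower := PySem.Str.lower skill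
  if PySem.Str.isIn skill_lower job_lower then (acc.1 ++ [skill], acc.2.1, acc.2.2)
  else if words.any (fun w => PySem.Str.isIn skill_lower w || PySem.Str.isIn w skill_lower) then
    (acc.1, acc.2.1 ++ [skill], acc.2.2)
  else (acc.1, acc.2.1, acc.2.2 ++ [skill])

def prioritize_skills_py_alt (skills : List (String × List String)) (job_description : String) : List String :=
  let job_lower := PySem.Str.lower job_description
  let all_skills := (PySem.Dict.mk skills).getD "technical" []
    ++ (PySem.Dict.mk skills).getD "soft" []
  let words := PySem.Str.split₀ job_lower
  let r := all_skills.foldl (pvStep job_lower words) ([], [], [])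
  r.1 ++ r.2.1 ++ r.2.2

-- ===== PRECONDITION & SPEC =====
def Spec_prioritize_skills_py (skills : List (String × List String)) (job_description : String) (out : List String) : Prop := out = prioritize_skills_py_alt skills job_description
instance (skills : List (String × List String)) (job_description : String) (out : List String) : Decidable (Spec_prioritize_skills_py skills job_description out) := by unfold Spec_prioritize_skills_py; infer_instance

-- ===== CLAIM (what is proved, stated in full; the proofs are below) =====
def Claim_equal_prioritize_skills_py : Prop := ∀ (skills : List (String × List String)) (job_description : String), Dom_prioritize_skills_py skills job_description → Spec_prioritize_skills_py skills job_description (prioritize_skills_py skills job_description)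

-- ===== LEMMAS AND PROOFS =====

-- the relevance loop is the 'any' test
theorem pvRelLoop_eq_any (sl : String) (ws : List String) :
    pvRelLoop sl ws =
      if ws.any (fun w => PySem.Str.isIn sl w || PySem.Str.isIn w sl) then 1 else 0 := by
  induction ws with
  | nil => simp [pvRelLoop]
  | cons w ws ih =>
    simp only [pvRelLoop, List.any_cons, ih]
    by_cases h : (PySem.Str.isIn sl w || PySem.Str.isIn w sl) = true
    · rw [if_pos h, if_pos (by rw [h, Bool.true_or])]
    · have h' : (PySem.Str.isIn sl w || PySem.Str.isIn w sl) = false := by simpa using h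
      rw [if_neg h]
      simp only [h', Bool.false_or]

-- x inserted in front when it goes before every element
theorem insertBy_of_forall_before {α : Type} (before : α → α → Bool) (x : α) (l : List α)
    (h : ∀ y ∈ l, before x y = true) :
    PySem.List.insertBy before x l = x :: l := by
  cases l with
  | nil => rfl
  | cons y ys => simp [PySem.List.insertBy, h y (by simp)]

-- insertBy skips a prefix it does not go before
theorem insertBy_append_not {α : Type} (before : α → α → Bool) (x : α) (A B : List α)
    (h : ∀ y ∈ A, before x y = false) :
    PySem.List.insertBy before x (A ++ B) = A ++ PySem.List.insertBy before x B := by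
  induction A with
  | nil => simp
  | cons a as ih =>
    simp only [List.cons_append, PySem.List.insertBy, h a (by simp)]
    rw [if_neg (by simp), ih (fun y hy => h y (by simp [hy]))]

-- the insertion-sort foldl keeps the three buckets concatenated
theorem foldl_insertBy_buckets (xs : List (String × Int)) (h2 h1 h0 : List (String × Int))
    (hh2 : ∀ y ∈ h2, y.2 = 2) (hh1 : ∀ y ∈ h1, y.2 = 1) (hh0 : ∀ y ∈ h0, y.2 = 0)
    (hx : ∀ x ∈ xs, x.2 = 0 ∨ x.2 = 1 ∨ x.2 = 2) :
    xs.foldl (fun acc x => PySem.List.insertBy (fun a b => decide (b.2 < a.2)) x acc)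
        (h2 ++ h1 ++ h0) =
      (h2 ++ xs.filter (fun x => x.2 == 2)) ++ (h1 ++ xs.filter (fun x => x.2 == 1))
        ++ (h0 ++ xs.filter (fun x => x.2 == 0)) := by
  induction xs generalizing h2 h1 h0 with
  | nil => simp
  | cons x xs ih =>
    have hxs : ∀ y ∈ xs, y.2 = 0 ∨ y.2 = 1 ∨ y.2 = 2 := fun y hy => hx y (by simp [hy])
    rcases hx x (by simp) with h | h | h
    · -- x.2 = 0 : goes to the end
      have : PySem.List.insertBy (fun a b => decide (b.2 < a.2)) x (h2 ++ h1 ++ h0)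
          = h2 ++ h1 ++ (h0 ++ [x]) := by
        rw [PySem.List.insertBy_of_forall_not_before]
        · simp
        · intro y hy
          simp only [List.append_assoc, List.mem_append] at hy
          rcases hy with hy | hy | hy
          · simp [hh2 y hy, h]
          · simp [hh1 y hy, h]
          · simp [hh0 y hy, h]
      simp only [List.foldl_cons, this]
      rw [ih h2 h1 (h0 ++ [x]) hh2 hh1
        (by intro y hy; rcases List.mem_append.1 hy with hy | hy
            · exact hh0 y hy
            · simp at hy; simp [hy, h]) hxs]
      simp [h, List.filter_cons]
    · -- x.2 = 1 : after h1, before h0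
      have : PySem.List.insertBy (fun a b => decide (b.2 < a.2)) x (h2 ++ h1 ++ h0)
          = h2 ++ (h1 ++ [x]) ++ h0 := by
        rw [List.append_assoc, insertBy_append_not _ _ _ _ (fun y hy => by simp [hh2 y hy, h]),
          insertBy_append_not _ _ _ _ (fun y hy => by simp [hh1 y hy, h]),
          insertBy_of_forall_before _ _ _ (fun y hy => by simp [hh0 y hy, h])]
        simp
      simp only [List.foldl_cons, this]
      rw [ih h2 (h1 ++ [x]) h0 hh2
        (by intro y hy; rcases List.mem_append.1 hy with hy | hy
            · exact hh1 y hy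
            · simp at hy; simp [hy, h]) hh0 hxs]
      simp [h, List.filter_cons]
    · -- x.2 = 2 : after h2, before h1 ++ h0
      have : PySem.List.insertBy (fun a b => decide (b.2 < a.2)) x (h2 ++ h1 ++ h0)
          = (h2 ++ [x]) ++ h1 ++ h0 := by
        rw [List.append_assoc, insertBy_append_not _ _ _ _ (fun y hy => by simp [hh2 y hy, h]),
          insertBy_of_forall_before _ _ _ (by
            intro y hy
            rcases List.mem_append.1 hy with hy | hy
            · simp [hh1 y hy, h]
            · simp [hh0 y hy, h])]
        simp
      simp only [List.foldl_cons, this]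
      rw [ih (h2 ++ [x]) h1 h0
        (by intro y hy; rcases List.mem_append.1 hy with hy | hy
            · exact hh2 y hy
            · simp at hy; simp [hy, h]) hh1 hh0 hxs]
      simp [h, List.filter_cons]

-- Python's stable reverse sort on 0/1/2 scores is the three-bucket concatenation
theorem sorted_buckets (xs : List (String × Int))
    (hx : ∀ x ∈ xs, x.2 = 0 ∨ x.2 = 1 ∨ x.2 = 2) :
    PySem.List.sorted xs (fun x => x.2) true =
      xs.filter (fun x => x.2 == 2) ++ xs.filter (fun x => x.2 == 1)
        ++ xs.filter (fun x => x.2 == 0) := by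
  rw [PySem.List.sorted_rev_eq_foldl_insertBy]
  have := foldl_insertBy_buckets xs [] [] [] (by simp) (by simp) (by simp) hx
  simpa using this

-- B's bucket foldl collects the three filters after the starting buckets
theorem foldl_pvStep (jl : String) (ws : List String) (xs : List String)
    (h m l : List String) :
    xs.foldl (pvStep jl ws) (h, m, l) =
      (h ++ xs.filter (fun s => PySem.Str.isIn (PySem.Str.lower s) jl),
       m ++ xs.filter (fun s => !PySem.Str.isIn (PySem.Str.lower s) jl
          && ws.any (fun w => PySem.Str.isIn (PySem.Str.lower s) w || PySem.Str.isIn w (PySem.Str.lower s))),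
       l ++ xs.filter (fun s => !PySem.Str.isIn (PySem.Str.lower s) jl
          && !ws.any (fun w => PySem.Str.isIn (PySem.Str.lower s) w || PySem.Str.isIn w (PySem.Str.lower s)))) := by
  induction xs generalizing h m l with
  | nil => simp
  | cons x xs ih =>
    simp only [List.foldl_cons, pvStep]
    by_cases h2 : PySem.Chars.isIn (PySem.Chars.lower x.toList) jl.toList = true
    · simp [h2, ih, List.filter_cons]
    · by_cases hm : ∃ w ∈ ws, PySem.Chars.isIn (PySem.Chars.lower x.toList) w.toList = true ∨ PySem.Chars.isIn w.toList (PySem.Chars.lower x.toList) = true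
      · simp [h2, hm, ih, List.filter_cons]
        obtain ⟨w, hw, hor⟩ := hm
        exact ⟨w, hw, fun hf => by rcases hor with h | h
                                   · rw [h] at hf; cases hf
                                   · exact h⟩
      · simp [h2, hm, ih, List.filter_cons]
        push_neg at hm
        intro w hw
        exact ⟨by simpa using (hm w hw).1, by simpa using (hm w hw).2⟩

-- the three score tests, pointwise
theorem score_eq_two (jl s : String) :
    (pvSkillRelevance jl s == 2) = PySem.Str.isIn (PySem.Str.lower s) jl := by
  simp only [pvSkillRelevance, pvRelLoop_eq_any]
  split_ifs with h1 h2 <;> simp only [Bool.not_eq_true] at h1 <;> rw [h1] <;> rfl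

theorem score_eq_one (jl s : String) :
    (pvSkillRelevance jl s == 1)
      = (!PySem.Str.isIn (PySem.Str.lower s) jl
          && (PySem.Str.split₀ jl).any (fun w => PySem.Str.isIn (PySem.Str.lower s) w || PySem.Str.isIn w (PySem.Str.lower s))) := by
  simp only [pvSkillRelevance, pvRelLoop_eq_any]
  split_ifs with h1 h2
  · rw [h1]; rfl
  · simp only [Bool.not_eq_true] at h1; rw [h1, h2]; rfl
  · simp only [Bool.not_eq_true] at h1 h2; rw [h1, h2]; rfl

theorem score_eq_zero (jl s : String) :
    (pvSkillRelevance jl s == 0)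
      = (!PySem.Str.isIn (PySem.Str.lower s) jl
          && !(PySem.Str.split₀ jl).any (fun w => PySem.Str.isIn (PySem.Str.lower s) w || PySem.Str.isIn w (PySem.Str.lower s))) := by
  simp only [pvSkillRelevance, pvRelLoop_eq_any]
  split_ifs with h1 h2
  · rw [h1]; rfl
  · simp only [Bool.not_eq_true] at h1; rw [h1, h2]; rfl
  · simp only [Bool.not_eq_true] at h1 h2; rw [h1, h2]; rfl

theorem score_cases (jl s : String) :
    pvSkillRelevance jl s = 0 ∨ pvSkillRelevance jl s = 1 ∨ pvSkillRelevance jl s = 2 := by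
  simp only [pvSkillRelevance, pvRelLoop_eq_any]
  split_ifs <;> omega


-- generic filter-of-filter reductions
theorem filter_filter_self {α : Type} (ys : List α) (p q : α → Bool)
    (h : ∀ x, q x = true → p x = true) : (ys.filter q).filter p = ys.filter q :=
  List.filter_eq_self.mpr (fun x hx => h x (List.mem_filter.1 hx).2)

theorem filter_filter_nil {α : Type} (ys : List α) (p q : α → Bool)
    (h : ∀ x, q x = true → p x = false) : (ys.filter q).filter p = [] := by
  rw [List.filter_eq_nil_iff]
  intro x hx
  simp [h x (List.mem_filter.1 hx).2]

-- map fst of a score-filtered scored list is a filter of the skills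
theorem map_fst_filter (jl : String) (all : List String) (p : Int → Bool) :
    ((all.map (fun s => (s, pvSkillRelevance jl s))).filter (fun x => p x.2)).map (fun x => x.1)
      = all.filter (fun s => p (pvSkillRelevance jl s)) := by
  rw [List.filter_map, List.map_map]
  simp [Function.comp_def]

-- the pipeline equality behind the claim
theorem pipelines_eq (jl : String) (all : List String) :
    ((PySem.List.sorted (all.map (fun s => (s, pvSkillRelevance jl s))) (fun x => x.2) true).filter
        (fun x => decide (0 < x.2))).map (fun x => x.1)
      ++ ((PySem.List.sorted (all.map (fun s => (s, pvSkillRelevance jl s))) (fun x => x.2) true).filter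
        (fun x => x.2 == 0)).map (fun x => x.1)
    = (all.foldl (pvStep jl (PySem.Str.split₀ jl)) ([], [], [])).1
      ++ (all.foldl (pvStep jl (PySem.Str.split₀ jl)) ([], [], [])).2.1
      ++ (all.foldl (pvStep jl (PySem.Str.split₀ jl)) ([], [], [])).2.2 := by
  rw [sorted_buckets _ (by
    intro x hx
    simp only [List.mem_map] at hx
    obtain ⟨s, _, rfl⟩ := hx
    exact score_cases jl s)]
  rw [foldl_pvStep]
  simp only [List.filter_append]
  rw [filter_filter_self _ (fun x : String × Int => decide (0 < x.2)) (fun x => x.2 == 2) (fun x hx => by simp at hx ⊢; omega),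
    filter_filter_self _ (fun x : String × Int => decide (0 < x.2)) (fun x => x.2 == 1) (fun x hx => by simp at hx ⊢; omega),
    filter_filter_nil _ (fun x : String × Int => decide (0 < x.2)) (fun x => x.2 == 0) (fun x hx => by simp at hx ⊢; omega),
    filter_filter_nil _ (fun x : String × Int => x.2 == 0) (fun x => x.2 == 2) (fun x hx => by simp at hx ⊢; omega),
    filter_filter_nil _ (fun x : String × Int => x.2 == 0) (fun x => x.2 == 1) (fun x hx => by simp at hx ⊢; omega),
    filter_filter_self _ (fun x : String × Int => x.2 == 0) (fun x => x.2 == 0) (fun x hx => hx)]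
  simp only [List.append_nil, List.nil_append, List.map_append]
  rw [map_fst_filter jl all (fun n => n == 2), map_fst_filter jl all (fun n => n == 1),
    map_fst_filter jl all (fun n => n == 0)]
  simp only [score_eq_two, score_eq_one, score_eq_zero, List.append_assoc]

-- ===== VERDICT (by name: the statement is the Claim_ definition above) =====
theorem prioritize_skills_py_spec : Claim_equal_prioritize_skills_py := by
  intro skills job_description _
  unfold Spec_prioritize_skills_py
  simp only [prioritize_skills_py, prioritize_skills_py_alt]
  exact pipelines_eq (PySem.Str.lower job_description)
    ((PySem.Dict.mk skills).getD "technical" [] ++ (PySem.Dict.mk skills).getD "soft" [])
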